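-- pv_equiv track=rewrite | github.com/lynnpepin/voxelnet | library.py | ravel_multi_index
-- ===== SOURCE A (Python) =====
-- def ravel_multi_index(
--     index = (0, 0, 0),
--     shape = (10, 400, 352)
-- ):
--     """Flatten an index for a given range
--
--     :param index: Multi-axis index, defaults to (0, 0, 0)
--     :type index: tuple, optional
--     :param shape: Range of the index, defaults to (10, 400, 352)
--     :type shape: tuple, optional
--     :return: Flat index for the given shape
--     :rtype: int
--     """
--     assert len(index) == len(shape)
--     flat_index = 0
--     for axis in range(len(index)):
--         flat_index = flat_index * shape[axis]
--         flat_index = flat_index + index[axis]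
--
--     return flat_index
-- ===== SOURCE B (Python) =====
-- def ravel_multi_index(
--     index = (0, 0, 0),
--     shape = (10, 400, 352)
-- ):
--     """Flatten an index for a given range (strides table + dot product)."""
--     assert len(index) == len(shape)
--     strides = []
--     mult = 1
--     for s in reversed(shape):
--         strides.append(mult)
--         mult = mult * s
--     strides.reverse()
--     return sum(i * m for i, m in zip(index, strides))
-- ===== Notes on version B (the rewrite author's own statement) =====
-- stated objective: alternative
-- what changed: Replaces the forward Horner accumulation (flat = flat*shape[axis] + index[axis]) by first building an explicit strides table (running product over reversed shape) and then returning the dot product sum(index[i]*strides[i]) over zip.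
import Mathlib
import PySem

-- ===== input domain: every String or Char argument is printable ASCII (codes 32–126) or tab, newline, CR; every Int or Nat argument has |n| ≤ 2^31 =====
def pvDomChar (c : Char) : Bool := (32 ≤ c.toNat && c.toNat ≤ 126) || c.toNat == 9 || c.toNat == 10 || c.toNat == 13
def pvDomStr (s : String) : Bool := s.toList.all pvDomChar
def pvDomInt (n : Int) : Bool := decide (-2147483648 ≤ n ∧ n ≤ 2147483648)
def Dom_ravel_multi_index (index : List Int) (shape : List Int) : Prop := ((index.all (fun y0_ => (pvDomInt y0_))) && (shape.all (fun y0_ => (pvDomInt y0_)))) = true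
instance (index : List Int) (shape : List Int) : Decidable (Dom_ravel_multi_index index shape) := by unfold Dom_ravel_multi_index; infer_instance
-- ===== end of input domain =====

-- B builds an explicit strides table and returns the dot product sum(index[i]*strides[i]);
-- A accumulates with Horner's rule (flat = flat*shape[axis] + index[axis]).

-- ===== PORT A =====
-- assert len(index) == len(shape); flat = 0; for axis in range(len(index)): flat = flat*shape[axis]; flat = flat+index[axis]
def ravel_multi_index (index : List Int) (shape : List Int) : Int :=
  (PySem.List.pyRange 0 (index.length : Int) 1).foldl
    (fun flat axis => flat * PySem.List.pyGetD shape axis 0 + PySem.List.pyGetD index axis 0) 0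

-- ===== PORT B =====
-- strides = []; mult = 1; for s in reversed(shape): strides.append(mult); mult = mult*s; strides.reverse()
def ravel_strides (shape : List Int) : List Int :=
  ((shape.reverse.foldl (fun (p : List Int × Int) s => (p.1 ++ [p.2], p.2 * s)) ([], 1)).1).reverse

-- return sum(i * m for i, m in zip(index, strides))
def ravel_multi_index_alt (index : List Int) (shape : List Int) : Int :=
  ((index.zip (ravel_strides shape)).map (fun q => q.1 * q.2)).sum

-- ===== PRECONDITION & SPEC =====
-- A's assert raises AssertionError when len(index) != len(shape); exactly those inputs are excluded.
def Pre_ravel_multi_index (index : List Int) (shape : List Int) : Prop := index.length = shape.length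
instance (index : List Int) (shape : List Int) : Decidable (Pre_ravel_multi_index index shape) := by unfold Pre_ravel_multi_index; infer_instance
def pvWitness_ravel_multi_index : List Int × List Int := ([2, 3, 5], [10, 400, 352])

def Spec_ravel_multi_index (index : List Int) (shape : List Int) (out : Int) : Prop := out = ravel_multi_index_alt index shape
instance (index : List Int) (shape : List Int) (out : Int) : Decidable (Spec_ravel_multi_index index shape out) := by unfold Spec_ravel_multi_index; infer_instance

-- ===== CLAIM (what is proved, stated in full; the proofs are below) =====
def Claim_equal_ravel_multi_index : Prop := ∀ (index : List Int) (shape : List Int), Dom_ravel_multi_index index shape → Pre_ravel_multi_index index shape → Spec_ravel_multi_index index shape (ravel_multi_index index shape)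

-- ===== LEMMAS AND PROOFS =====

-- reference form of the strides the fold in ravel_strides produces, element by element
def multsRef : List Int → Int → List Int
  | [], _ => []
  | s :: ss, m => m :: multsRef ss (m * s)

theorem foldl_strides_eq (l : List Int) (acc : List Int) (m : Int) :
    l.foldl (fun (p : List Int × Int) s => (p.1 ++ [p.2], p.2 * s)) (acc, m)
      = (acc ++ multsRef l m, m * l.prod) := by
  induction l generalizing acc m with
  | nil => simp [multsRef]
  | cons s ss ih => simp [multsRef, ih, mul_assoc]

theorem multsRef_append (xs ys : List Int) (m : Int) :
    multsRef (xs ++ ys) m = multsRef xs m ++ multsRef ys (m * xs.prod) := by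
  induction xs generalizing m with
  | nil => simp [multsRef]
  | cons x xs ih => simp [multsRef, ih, mul_assoc]

-- per-axis stride = product of the trailing shape entries
def stridesRef : List Int → List Int
  | [] => []
  | _ :: ss => ss.prod :: stridesRef ss

theorem ravel_strides_eq (shape : List Int) : ravel_strides shape = stridesRef shape := by
  unfold ravel_strides
  rw [foldl_strides_eq]
  induction shape with
  | nil => simp [multsRef, stridesRef]
  | cons s ss ih =>
      simp only [List.reverse_cons, multsRef_append, multsRef, one_mul,
        List.prod_reverse, List.nil_append] at *
      simp [stridesRef, ih]

theorem horner_zip_eq (index shape : List Int) (h : index.length = shape.length) (acc : Int) :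
    (index.zip shape).foldl (fun f p => f * p.2 + p.1) acc
      = acc * shape.prod + ((index.zip (stridesRef shape)).map (fun q => q.1 * q.2)).sum := by
  induction index generalizing shape acc with
  | nil =>
      cases shape with
      | nil => simp
      | cons s ss => simp at h
  | cons i is ih =>
      cases shape with
      | nil => simp at h
      | cons s ss =>
          simp only [List.length_cons, Nat.add_right_cancel_iff] at h
          simp only [List.zip_cons_cons, List.foldl_cons, stridesRef, List.map_cons,
            List.sum_cons, List.prod_cons]
          rw [ih ss h]
          ring

theorem A_eq_zipfold (index shape : List Int) (h : index.length = shape.length) :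
    ravel_multi_index index shape = (index.zip shape).foldl (fun f p => f * p.2 + p.1) 0 := by
  unfold ravel_multi_index
  have hz : (index.zip shape).length = index.length := by simp [h]
  have hcong :
      (PySem.List.pyRange 0 (((index.zip shape).length : Nat) : Int) 1).foldl
        (fun flat axis => flat * PySem.List.pyGetD shape axis 0 + PySem.List.pyGetD index axis 0) 0
      = (PySem.List.pyRange 0 (((index.zip shape).length : Nat) : Int) 1).foldl
        (fun flat axis => flat * (PySem.List.pyGetD (index.zip shape) axis (0, 0)).2
            + (PySem.List.pyGetD (index.zip shape) axis (0, 0)).1) 0 := by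
    apply PySem.List.foldl_congr_mem
    intro acc a ha
    rw [PySem.List.mem_pyRange_one] at ha
    obtain ⟨h0, hlt⟩ := ha
    have haz : a < ((index.zip shape).length : Int) := hlt
    have hai : a.toNat < index.length := by omega
    have has : a.toNat < shape.length := by omega
    rw [PySem.List.pyGetD_eq_getElem _ _ h0 haz,
        PySem.List.pyGetD_eq_getElem index _ h0 (by omega),
        PySem.List.pyGetD_eq_getElem shape _ h0 (by omega),
        List.getElem_zip]
  rw [← hz] at *
  rw [hcong, PySem.List.foldl_pyRange_zero_pyGetD' (index.zip shape) (0,0)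
        (fun f p => f * p.2 + p.1) 0]

-- ===== VERDICT (by name: the statement is the Claim_ definition above) =====
theorem ravel_multi_index_spec : Claim_equal_ravel_multi_index := by
  intro index shape _ hpre
  unfold Spec_ravel_multi_index ravel_multi_index_alt
  rw [A_eq_zipfold index shape hpre, ravel_strides_eq, horner_zip_eq index shape hpre 0]
  simp
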